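-- pv_equiv track=rewrite | github.com/ReboUFV/EDA | LAB_2/exa/ej-hugo.py | categorizar_unicos
-- ===== SOURCE A (Python) =====
-- def categorizar_unicos(lista):
--     unicos = {}
--     emptys = set()
--     for element in lista:
--         # Convierte el primer carácter en mayuscula y el resto en minuscula
--         element = element.capitalize()
--
--         try:
--             unicos[element[0]].add(element)
--
--         except KeyError:
--             unicos[element[0]] = {element}
--
--         '''
--         if unicos == {}:
--             unicos[element[0]] = {element}
--         else:
--             unicos[element[0]].add(element)
--             '''
--     return unicos
-- ===== SOURCE B (Python) =====
-- def categorizar_unicos(lista):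
--     # Two-pass: capitalize everything once, then for each first-seen initial
--     # collect its whole group by a scan over the capitalized list.
--     caps = [e.capitalize() for e in lista]
--     res = {}
--     for c in caps:
--         k = c[0]
--         if k not in res:
--             grp = set()
--             for x in caps:
--                 if x[0] == k:
--                     grp.add(x)
--             res[k] = grp
--     return res
-- ===== Notes on version B (the rewrite author's own statement) =====
-- stated objective: alternative
-- what changed: Replaces the single-pass try/except hash accumulation with a two-pass scheme: capitalize all elements first, then for each first-seen initial letter build its whole group in one scan of the capitalized list.
import Mathlib
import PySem

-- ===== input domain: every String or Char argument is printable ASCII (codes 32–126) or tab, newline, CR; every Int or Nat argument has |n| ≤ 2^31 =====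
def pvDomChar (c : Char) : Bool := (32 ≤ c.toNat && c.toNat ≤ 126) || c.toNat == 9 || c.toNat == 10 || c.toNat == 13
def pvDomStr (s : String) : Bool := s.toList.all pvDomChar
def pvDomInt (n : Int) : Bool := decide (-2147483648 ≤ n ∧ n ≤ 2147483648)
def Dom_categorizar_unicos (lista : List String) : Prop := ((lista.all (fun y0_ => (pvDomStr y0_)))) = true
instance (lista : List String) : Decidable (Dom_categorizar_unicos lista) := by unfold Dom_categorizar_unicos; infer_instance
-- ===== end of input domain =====

-- B replaces A's single-pass try/except hash accumulation by a two-pass scheme (capitalize all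
-- elements first, then gather each first-seen initial's whole group by a scan of the capitalized
-- list); same return value on Pre_, no speed claim.


-- str.capitalize(): first char uppercased, rest lowered — exact on the ASCII strings Dom_ admits
def pyCapitalize (s : String) : String :=
  match s.toList with
  | [] => ""
  | c :: cs => String.ofList (PySem.Chars.upperChar c :: PySem.Chars.lower cs)

-- ===== PORT A =====
-- A's loop body: try unicos[e[0]].add(e) / except KeyError: unicos[e[0]] = {e}
def pyStepA (unicos : PySem.Dict String (List String)) (e : String) :
    PySem.Dict String (List String) :=
  match PySem.Str.pyGet? e 0 with
  | none => unicos          -- IndexError on e = "" : excluded by Pre_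
  | some c =>
    let k := String.ofList [c]
    match unicos.get? k with
    | some s => unicos.insert k (PySem.Set.add s e)
    | none   => unicos.insert k (PySem.Set.ofList [e])

def categorizar_unicos (lista : List String) : List (String × List String) :=
  (lista.foldl (fun unicos element => pyStepA unicos (pyCapitalize element)) PySem.Dict.empty).items

-- ===== PORT B =====
-- B's loop body: if c[0] not seen yet, collect its whole group by a scan over caps
def pyStepB (caps : List String) (res : PySem.Dict String (List String)) (c : String) :
    PySem.Dict String (List String) :=
  match PySem.Str.pyGet? c 0 with
  | none => res             -- IndexError on c = "" : excluded by Pre_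
  | some ch =>
    let k := String.ofList [ch]
    if res.contains k then res
    else
      res.insert k (caps.foldl (fun grp x =>
          match PySem.Str.pyGet? x 0 with
          | none => grp
          | some xc => if String.ofList [xc] == k then PySem.Set.add grp x else grp
        ) PySem.Set.empty)

def categorizar_unicos_alt (lista : List String) : List (String × List String) :=
  let caps := lista.map pyCapitalize
  (caps.foldl (pyStepB caps) PySem.Dict.empty).items

-- ===== PRECONDITION & SPEC =====
-- Pre_ excludes lists containing the empty string, on which A raises IndexError at element[0].
def Pre_categorizar_unicos (lista : List String) : Prop := ∀ s ∈ lista, s ≠ ""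
instance (lista : List String) : Decidable (Pre_categorizar_unicos lista) := by unfold Pre_categorizar_unicos; infer_instance
def pvWitness_categorizar_unicos : List String := ["abc", "Axe", "bob", "abc"]

def Spec_categorizar_unicos (lista : List String) (out : List (String × List String)) : Prop := out = categorizar_unicos_alt lista
instance (lista : List String) (out : List (String × List String)) : Decidable (Spec_categorizar_unicos lista out) := by unfold Spec_categorizar_unicos; infer_instance

-- ===== CLAIM (what is proved, stated in full; the proofs are below) =====
def Claim_equal_categorizar_unicos : Prop := ∀ (lista : List String), Dom_categorizar_unicos lista → Pre_categorizar_unicos lista → Spec_categorizar_unicos lista (categorizar_unicos lista)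

-- ===== LEMMAS AND PROOFS =====

-- the grouping key of a (capitalized) string: its first character as a 1-char string
def keyOf (s : String) : String := String.ofList (s.toList.take 1)

-- the group of key k: the distinct elements of ys with first char k, in first-occurrence order
def grpOf (ys : List String) (k : String) : List String :=
  PySem.Set.ofList (ys.filter (fun y => keyOf y == k))

-- the common result table: one entry per distinct key, in first-occurrence order
def tblOf (ys : List String) : List (String × List String) :=
  (PySem.List.dedup (ys.map keyOf)).map (fun k => (k, grpOf ys k))

theorem ofList_append_singleton (l : List String) (x : String) :
    PySem.Set.ofList (l ++ [x]) = PySem.Set.add (PySem.Set.ofList l) x := by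
  rw [PySem.Set.ofList_eq_foldl, PySem.Set.ofList_eq_foldl, List.foldl_append]; rfl

theorem dedup_append_singleton (l : List String) (x : String) :
    PySem.List.dedup (l ++ [x]) = if x ∈ l then PySem.List.dedup l else PySem.List.dedup l ++ [x] := by
  rw [PySem.List.dedup_eq_ofList, PySem.List.dedup_eq_ofList, PySem.Set.ofList_eq_foldl,
    PySem.Set.ofList_eq_foldl, List.foldl_append]
  simp [List.foldl, PySem.Set.add, PySem.Set.contains, ← PySem.Set.ofList_eq_foldl]

theorem stepA_eq (d : PySem.Dict String (List String)) (e : String) (h : e.toList ≠ []) :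
    pyStepA d e = d.insert (keyOf e) (PySem.Set.add (d.getD (keyOf e) []) e) := by
  cases hs : e.toList with
  | nil => exact absurd hs h
  | cons c cs =>
    have hget : PySem.Str.pyGet? e 0 = some c := by simp [hs]
    have hkey : keyOf e = String.ofList [c] := by simp [keyOf, hs]
    rw [pyStepA, hget, hkey]
    cases hd : d.get? (String.ofList [c]) with
    | some s =>
      simp [hd, PySem.Dict.getD_eq_get?_getD]
    | none =>
      simp [hd, PySem.Dict.getD_eq_get?_getD, PySem.Set.ofList, PySem.Set.add,
        PySem.Set.contains, PySem.Set.empty]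

theorem foldA_items (ys : List String) (hne : ∀ y ∈ ys, y.toList ≠ []) :
    (ys.foldl pyStepA PySem.Dict.empty).items = tblOf ys := by
  induction ys using List.reverseRecOn with
  | nil => rfl
  | append_singleton ys e ih =>
    have hne' : ∀ y ∈ ys, y.toList ≠ [] := fun y hy => hne y (by simp [hy])
    have he : e.toList ≠ [] := hne e (by simp)
    rw [List.foldl_append, List.foldl_cons, List.foldl_nil, stepA_eq _ _ he]
    set d := ys.foldl pyStepA PySem.Dict.empty with hdd
    have hd : d.items = tblOf ys := ih hne'
    have hkeys : d.keys = PySem.List.dedup (ys.map keyOf) := by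
      show d.items.map Prod.fst = _
      rw [hd]; simp [tblOf, Function.comp_def]
    have hnd : d.keys.Nodup := by rw [hkeys]; exact PySem.List.nodup_dedup _
    by_cases hk : keyOf e ∈ ys.map keyOf
    · have hc : d.contains (keyOf e) = true := by
        rw [PySem.Dict.contains_eq_decide_mem_keys, hkeys]
        simp [hk]
      have hmem : (keyOf e, grpOf ys (keyOf e)) ∈ d.items := by
        rw [hd]; exact List.mem_map_of_mem (by simpa [PySem.List.mem_dedup] using hk)
      have hget : d.getD (keyOf e) [] = grpOf ys (keyOf e) :=
        PySem.Dict.getD_of_mem_items _ hmem hnd []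
      rw [hget, PySem.Dict.items_insert_of_contains _ _ hc, hd]
      unfold tblOf
      rw [List.map_append]
      simp only [List.map_cons, List.map_nil]
      rw [dedup_append_singleton]
      simp only [hk, if_true, List.map_map]
      refine List.map_congr_left (fun k' hk' => ?_)
      by_cases hkk : k' = keyOf e
      · subst hkk
        simp only [Function.comp, beq_self_eq_true, if_true, grpOf, List.filter_append]
        rw [List.filter_cons]
        simp [ofList_append_singleton]
      · have hb : (k' == keyOf e) = false := by simp [hkk]
        simp only [Function.comp, hb, grpOf, List.filter_append]
        rw [List.filter_cons]
        simp [beq_iff_eq, Ne.symm hkk]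
    · have hc : d.contains (keyOf e) = false := by
        rw [PySem.Dict.contains_eq_decide_mem_keys, hkeys]
        simp [hk]
      have hget : d.getD (keyOf e) [] = [] := PySem.Dict.getD_of_not_contains _ [] hc
      rw [hget, PySem.Dict.items_insert_of_not_contains _ _ hc, hd]
      unfold tblOf
      rw [List.map_append]
      simp only [List.map_cons, List.map_nil]
      rw [dedup_append_singleton]
      simp only [hk, if_false, List.map_append]
      congr 1
      · refine List.map_congr_left (fun k' hk' => ?_)
        have hkk : k' ≠ keyOf e := by
          rintro rfl; exact hk (by simpa [PySem.List.mem_dedup] using hk')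
        simp only [grpOf, List.filter_append]
        rw [List.filter_cons]
        simp [beq_iff_eq, Ne.symm hkk]
      · have hfil : ys.filter (fun y => keyOf y == keyOf e) = [] := by
          rw [List.filter_eq_nil_iff]
          intro y hy hby
          exact hk (List.mem_map.mpr ⟨y, hy, by simpa [beq_iff_eq] using hby⟩)
        simp [grpOf, List.filter_append, hfil, List.filter_cons, PySem.Set.add,
          PySem.Set.ofList, PySem.Set.empty]

theorem inner_eq (caps : List String) (k : String) (h : ∀ x ∈ caps, x.toList ≠ []) :
    caps.foldl (fun grp x =>
        match PySem.Str.pyGet? x 0 with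
        | none => grp
        | some xc => if String.ofList [xc] == k then PySem.Set.add grp x else grp
      ) PySem.Set.empty = grpOf caps k := by
  have hcongr := PySem.List.foldl_congr_mem caps
    (fun grp x =>
        match PySem.Str.pyGet? x 0 with
        | none => grp
        | some xc => if String.ofList [xc] == k then PySem.Set.add grp x else grp)
    (fun grp x => if keyOf x == k then PySem.Set.add grp x else grp)
    PySem.Set.empty
    (fun acc x hx => by
      cases hs : x.toList with
      | nil => exact absurd hs (h x hx)
      | cons c cs =>
        have hg : PySem.Str.pyGet? x 0 = some c := by simp [hs]
        have hkey : keyOf x = String.ofList [c] := by simp [keyOf, hs]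
        simp only [hg, hkey])
  rw [hcongr, ← List.foldl_filter, grpOf, PySem.Set.ofList_eq_foldl]
  rfl

theorem stepB_eq (caps : List String) (d : PySem.Dict String (List String)) (e : String)
    (he : e.toList ≠ []) (hcaps : ∀ x ∈ caps, x.toList ≠ []) :
    pyStepB caps d e =
      if d.contains (keyOf e) then d else d.insert (keyOf e) (grpOf caps (keyOf e)) := by
  cases hs : e.toList with
  | nil => exact absurd hs he
  | cons c cs =>
    have hg : PySem.Str.pyGet? e 0 = some c := by simp [hs]
    have hkey : keyOf e = String.ofList [c] := by simp [keyOf, hs]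
    rw [hkey]
    simp only [pyStepB, hg]
    rw [inner_eq caps _ hcaps]

theorem foldB_items (caps : List String) (hcaps : ∀ x ∈ caps, x.toList ≠ [])
    (p : List String) (hp : ∀ x ∈ p, x.toList ≠ []) :
    (p.foldl (pyStepB caps) PySem.Dict.empty).items =
      (PySem.List.dedup (p.map keyOf)).map (fun k => (k, grpOf caps k)) := by
  induction p using List.reverseRecOn with
  | nil => rfl
  | append_singleton p e ih =>
    have hp' : ∀ x ∈ p, x.toList ≠ [] := fun x hx => hp x (by simp [hx])
    have he : e.toList ≠ [] := hp e (by simp)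
    rw [List.foldl_append, List.foldl_cons, List.foldl_nil, stepB_eq caps _ _ he hcaps]
    set d := p.foldl (pyStepB caps) PySem.Dict.empty with hdd
    have hd : d.items = (PySem.List.dedup (p.map keyOf)).map (fun k => (k, grpOf caps k)) := ih hp'
    have hkeys : d.keys = PySem.List.dedup (p.map keyOf) := by
      show d.items.map Prod.fst = _
      rw [hd]; simp [Function.comp_def]
    by_cases hk : keyOf e ∈ p.map keyOf
    · have hc : d.contains (keyOf e) = true := by
        rw [PySem.Dict.contains_eq_decide_mem_keys, hkeys]; simp [hk]
      rw [if_pos hc, hd, List.map_append]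
      simp only [List.map_cons, List.map_nil]
      rw [dedup_append_singleton]
      simp [hk]
    · have hc : d.contains (keyOf e) = false := by
        rw [PySem.Dict.contains_eq_decide_mem_keys, hkeys]; simp [hk]
      rw [if_neg (by simp [hc]), PySem.Dict.items_insert_of_not_contains _ _ hc, hd, List.map_append]
      simp only [List.map_cons, List.map_nil]
      rw [dedup_append_singleton]
      simp [hk]

theorem pyCapitalize_ne_nil (s : String) (h : s ≠ "") : (pyCapitalize s).toList ≠ [] := by
  cases hs : s.toList with
  | nil => exact absurd (String.toList_eq_nil_iff.mp hs) h
  | cons c cs => simp [pyCapitalize, hs]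

-- ===== VERDICT (by name: the statement is the Claim_ definition above) =====
theorem categorizar_unicos_spec : Claim_equal_categorizar_unicos := by
  intro lista _ hpre
  unfold Spec_categorizar_unicos categorizar_unicos categorizar_unicos_alt
  rw [← List.foldl_map]
  have hne : ∀ y ∈ lista.map pyCapitalize, y.toList ≠ [] := by
    intro y hy
    obtain ⟨s, hs, rfl⟩ := List.mem_map.mp hy
    exact pyCapitalize_ne_nil s (hpre s hs)
  rw [foldA_items _ hne, foldB_items _ hne _ hne]
  rfl
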